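-- pv_equiv track=rewrite | github.com/chrishultin/advent-of-code | 2019/day-04/puzzle.py | part_two_is_valid
-- ===== SOURCE A (Python) =====
-- import itertools
--
-- def part_two_is_valid(password: str) -> bool:
--     has_duplicate = False
--     for i,g in itertools.groupby(password):
--         if len(list(g)) == 2:
--             has_duplicate = True
--     for i in range(0, len(password) - 1):
--         if password[i] > password[i + 1]:
--             return False
--
--     if not has_duplicate:
--         return False
--
--     return True
-- ===== SOURCE B (Python) =====
-- def part_two_is_valid(password: str) -> bool:
--     if "".join(sorted(password)) != password:
--         return False
--     run = 1
--     for a, b in zip(password, password[1:]):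
--         if a == b:
--             run += 1
--         else:
--             if run == 2:
--                 return True
--             run = 1
--     return run == 2
-- ===== Notes on version B (the rewrite author's own statement) =====
-- stated objective: alternative
-- what changed: B replaces A's groupby pass plus pairwise index scan with a sort-and-compare monotonicity test (the password equals its sorted character sequence) and a single explicit run-counting loop over adjacent pairs with early return on a run of exactly 2.
import Mathlib
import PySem

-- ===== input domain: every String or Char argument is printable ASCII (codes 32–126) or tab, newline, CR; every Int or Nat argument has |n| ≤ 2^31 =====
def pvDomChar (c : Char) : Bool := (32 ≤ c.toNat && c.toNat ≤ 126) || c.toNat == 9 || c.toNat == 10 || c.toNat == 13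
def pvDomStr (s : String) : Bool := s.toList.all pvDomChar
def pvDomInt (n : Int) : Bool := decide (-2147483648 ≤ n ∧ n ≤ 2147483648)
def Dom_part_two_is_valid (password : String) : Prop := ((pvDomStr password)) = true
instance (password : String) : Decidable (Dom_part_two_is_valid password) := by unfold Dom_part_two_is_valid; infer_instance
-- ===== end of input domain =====

-- B changes the monotonicity test from A's pairwise index scan to a sort-and-compare,
-- and the exact-double test from itertools.groupby to an explicit run-counting loop
-- with early return (objective: idiomatic/alternative; same asymptotic behaviour).

-- ===== PORT A =====

-- itertools.groupby over a list of Char: list of (key, group) for maximal runs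
-- of consecutive equal elements (hand-ported; PySem has no groupby).
def pyGroupbyA : List Char → List (Char × List Char)
  | [] => []
  | c :: cs =>
      (c, c :: cs.takeWhile (· == c)) :: pyGroupbyA (cs.dropWhile (· == c))
  termination_by l => l.length
  decreasing_by
    simp only [List.length_cons]
    exact Nat.lt_succ_of_le (List.length_dropWhile_le _ _)

-- the 'for i in range(0, len(password)-1)' loop with its early 'return False';
-- indices produced by the range are always in bounds, so pyGetD is exact here.
def loopA (cs : List Char) (hasDup : Bool) : List Int → Bool
  | [] => if !hasDup then false else true
  | i :: rest =>
      if PySem.List.pyGetD cs (i + 1) ' ' < PySem.List.pyGetD cs i ' ' then false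
      else loopA cs hasDup rest

def part_two_is_valid (password : String) : Bool :=
  let cs := password.toList
  let hasDup := (pyGroupbyA cs).foldl
    (fun acc g => if g.2.length == 2 then true else acc) false
  loopA cs hasDup (PySem.List.pyRange 0 ((cs.length : Int) - 1) 1)

-- ===== PORT B =====

-- the run-counting loop over zip(password, password[1:]) with early 'return True'
def runLoopB : List (Char × Char) → Int → Bool
  | [], run => decide (run = 2)
  | (a, b) :: rest, run =>
      if a = b then runLoopB rest (run + 1)
      else if run = 2 then true
      else runLoopB rest 1

def part_two_is_valid_alt (password : String) : Bool :=
  let cs := password.toList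
  -- '"".join(sorted(password)) != password' compared on the character lists
  if PySem.List.sorted cs (fun x => x) false ≠ cs then false
  else runLoopB (List.zip cs (PySem.List.slice cs (some 1) none)) 1

-- ===== PRECONDITION & SPEC =====
def Spec_part_two_is_valid (password : String) (out : Bool) : Prop := out = part_two_is_valid_alt password
instance (password : String) (out : Bool) : Decidable (Spec_part_two_is_valid password out) := by unfold Spec_part_two_is_valid; infer_instance

-- ===== CLAIM (what is proved, stated in full; the proofs are below) =====
def Claim_equal_part_two_is_valid : Prop := ∀ (password : String), Dom_part_two_is_valid password → Spec_part_two_is_valid password (part_two_is_valid password)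

-- ===== LEMMAS AND PROOFS =====

-- A's foldl over the groups is a disjunction over the groups
theorem foldlDup_eq_any (gs : List (Char × List Char)) (b : Bool) :
    gs.foldl (fun acc g => if g.2.length == 2 then true else acc) b
      = (b || gs.any (fun g => g.2.length == 2)) := by
  induction gs generalizing b with
  | nil => simp
  | cons g gs ih =>
      simp only [List.foldl_cons, List.any_cons, ih]
      by_cases h : g.2.length == 2 <;> simp [h]

-- B's run loop, one whole group at a time
theorem runLoopB_group (cs' : List Char) (c : Char) (run : Int) :
    runLoopB (List.zip (c :: cs') cs') run
      = (if (cs'.dropWhile (· == c)).isEmpty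
         then decide (run + ((cs'.takeWhile (· == c)).length : Int) = 2)
         else if run + ((cs'.takeWhile (· == c)).length : Int) = 2 then true
         else runLoopB (List.zip (cs'.dropWhile (· == c))
                        (cs'.dropWhile (· == c)).tail) 1) := by
  induction cs' generalizing c run with
  | nil => simp [runLoopB]
  | cons x xs ih =>
      by_cases hx : x = c
      · subst hx
        simp only [List.zip_cons_cons, runLoopB, if_true]
        rw [ih x (run + 1)]
        simp only [List.takeWhile_cons, List.dropWhile_cons, beq_self_eq_true,
          if_true, List.length_cons]
        push_cast
        have hr : run + 1 + ((xs.takeWhile (· == x)).length : Int)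
            = run + (((xs.takeWhile (· == x)).length : Int) + 1) := by ring
        rw [hr]
      · have hbx : (x == c) = false := by simp [hx]
        have hcx : ¬ c = x := fun h => hx h.symm
        have hdw : List.dropWhile (· == c) (x :: xs) = x :: xs := by
          simp [hbx]
        have htw : List.takeWhile (· == c) (x :: xs) = ([] : List Char) := by
          simp [hbx]
        rw [hdw, htw]
        simp only [runLoopB, List.zip_cons_cons, if_neg hcx, List.length_nil,
          Nat.cast_zero, add_zero, List.isEmpty_cons, List.tail_cons]
        rfl

-- B's run loop finds exactly the groups of length 2 that A's groupby fold finds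
theorem runLoopB_eq_any (cs : List Char) :
    runLoopB (List.zip cs (cs.drop 1)) 1
      = (pyGroupbyA cs).any (fun g => g.2.length == 2) := by
  match h : cs with
  | [] => simp [runLoopB, pyGroupbyA]
  | c :: cs' =>
      rw [pyGroupbyA]
      simp only [List.drop_one, List.tail_cons, List.any_cons]
      rw [runLoopB_group]
      have hdle : (cs'.dropWhile (· == c)).length ≤ cs'.length :=
        List.length_dropWhile_le _ _
      cases hdw : cs'.dropWhile (· == c) with
      | nil =>
          simp only [List.isEmpty_nil, if_true, pyGroupbyA, List.any_nil,
            Bool.or_false, List.length_cons]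
          by_cases h2 : (1 : Int) + ((cs'.takeWhile (· == c)).length : Int) = 2
          · have h1 : (cs'.takeWhile (· == c)).length = 1 := by omega
            simp [h2, h1]
          · have h1 : (cs'.takeWhile (· == c)).length ≠ 1 := by
              intro hx; apply h2; rw [hx]; norm_num
            simp [h2, h1]
      | cons d₀ d' =>
          have ih := runLoopB_eq_any (d₀ :: d')
          simp only [List.drop_one, List.tail_cons] at ih
          simp only [List.isEmpty_cons, Bool.false_eq_true, if_false,
            List.tail_cons, List.length_cons]
          rw [ih]
          by_cases h2 : (1 : Int) + ((cs'.takeWhile (· == c)).length : Int) = 2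
          · have h1 : (cs'.takeWhile (· == c)).length = 1 := by omega
            simp [h2, h1]
          · have h1 : (cs'.takeWhile (· == c)).length ≠ 1 := by
              intro hx; apply h2; rw [hx]; norm_num
            simp [h2, h1]
  termination_by cs.length
  decreasing_by simp_all

-- A's index loop over the remaining range tests IsChain (≤) on the remaining suffix
theorem loopA_eq_chain (cs : List Char) (hd : Bool) (a : Int) (ha : 0 ≤ a) :
    loopA cs hd (PySem.List.pyRange a ((cs.length : Int) - 1) 1)
      = if (cs.drop a.toNat).IsChain (· ≤ ·) then hd else false := by
  by_cases hab : a < (cs.length : Int) - 1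
  · rw [PySem.List.pyRange_one_cons hab, loopA]
    have hlt : a.toNat < cs.length := by omega
    have hlt1 : a.toNat + 1 < cs.length := by omega
    have hga : PySem.List.pyGetD cs a ' ' = cs[a.toNat] :=
      PySem.List.pyGetD_eq_getElem cs ' ' ha (by omega)
    have hga1 : PySem.List.pyGetD cs (a + 1) ' ' = cs[a.toNat + 1] := by
      rw [PySem.List.pyGetD_eq_getElem cs ' ' (by omega : (0:Int) ≤ a + 1) (by omega)]
      have hnt : (a + 1).toNat = a.toNat + 1 := by omega
      simp only [hnt]
    have hdrop : cs.drop a.toNat = cs[a.toNat] :: cs.drop (a.toNat + 1) :=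
      List.drop_eq_getElem_cons hlt
    have hdrop1 : cs.drop (a.toNat + 1) = cs[a.toNat + 1] :: cs.drop (a.toNat + 2) :=
      List.drop_eq_getElem_cons hlt1
    rw [hga, hga1, hdrop, hdrop1]
    simp only [List.isChain_cons_cons]
    by_cases hcmp : cs[a.toNat + 1] < cs[a.toNat]
    · rw [if_pos hcmp]
      have hn : ¬ (cs[a.toNat] ≤ cs[a.toNat + 1] ∧
          (cs[a.toNat + 1] :: cs.drop (a.toNat + 2)).IsChain (· ≤ ·)) := by
        intro ⟨h1, _⟩; exact absurd hcmp (not_lt.mpr h1)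
      rw [if_neg hn]
    · rw [if_neg hcmp]
      have ih := loopA_eq_chain cs hd (a + 1) (by omega)
      rw [ih]
      have hnt : (a + 1).toNat = a.toNat + 1 := by omega
      rw [hnt, hdrop1]
      by_cases hch : (cs[a.toNat + 1] :: cs.drop (a.toNat + 2)).IsChain (· ≤ ·)
      · rw [if_pos hch, if_pos ⟨not_lt.mp hcmp, hch⟩]
      · rw [if_neg hch, if_neg (fun h => hch h.2)]
  · rw [PySem.List.pyRange_one_eq_nil (by omega), loopA]
    have hlen : (cs.drop a.toNat).length ≤ 1 := by
      rw [List.length_drop]; omega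
    have hch : (cs.drop a.toNat).IsChain (· ≤ ·) := by
      match hl : cs.drop a.toNat with
      | [] => simp
      | [x] => simp
      | x :: y :: t => rw [hl] at hlen;simp at hlen
    rw [if_pos hch]
    cases hd <;> rfl
  termination_by ((cs.length : Int) - 1 - a).toNat
  decreasing_by omega

-- sorted(password) == password ↔ the characters are pairwise non-decreasing
theorem sorted_eq_iff_chain (cs : List Char) :
    (PySem.List.sorted cs (fun x => x) false = cs) ↔ cs.IsChain (· ≤ ·) := by
  rw [List.isChain_iff_pairwise]
  constructor
  · intro h
    have hp := PySem.List.sorted_pairwise cs (fun x => x)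
    rw [h] at hp
    exact hp
  · intro h
    exact PySem.List.sorted_eq_self_of_pairwise cs (fun x => x) h

-- ===== VERDICT (by name: the statement is the Claim_ definition above) =====
theorem part_two_is_valid_spec : Claim_equal_part_two_is_valid := by
  intro password _
  unfold Spec_part_two_is_valid part_two_is_valid part_two_is_valid_alt
  set cs := password.toList with hcs
  simp only
  rw [foldlDup_eq_any, Bool.false_or, loopA_eq_chain cs _ 0 le_rfl]
  have hslice : PySem.List.slice cs (some 1) none = cs.drop 1 := by
    have := PySem.List.slice_from cs (show (0:Int) ≤ 1 by norm_num)
    simpa using this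
  rw [hslice, Int.toNat_zero, List.drop_zero]
  by_cases hch : cs.IsChain (· ≤ ·)
  · rw [if_pos hch, if_neg (by simp [(sorted_eq_iff_chain cs).mpr hch])]
    exact (runLoopB_eq_any cs).symm
  · rw [if_neg hch,
      if_pos (by intro h; exact hch ((sorted_eq_iff_chain cs).mp h))]
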